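-- pv_equiv track=rewrite | github.com/bki-foods/AI_Denmark | bki_get_all_blend_combinations.py | blend_prop_permutations
-- ===== SOURCE A (Python) =====
-- import itertools
--
-- def blend_prop_permutations(contracts: list, N_components: int) -> list:
--
--     # Dictionary with lists of possible percentages used in blends. Keys indicate no of components in blend.
--     udfaldsrum = {
--          1: list([100])
--         ,2: [i for i in range(5,96,5)]
--         ,3: [i for i in range(5,91,5)]
--         ,4: [i for i in range(5,86,5)]
--         ,5: [i for i in range(5,81,5)]
--         ,6: [i for i in range(5,76,5)]
--         ,7: [i for i in range(5,71,5)]}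
--
--     # Combine proportions and contracts with contracts and proportions for single component blends
--     # blends_1_final = list(itertools.product(contracts_possible[1], udfaldsrum[1]))
--
--     # Get all possible contract permutations for blends with N components
--     blends = [contract for contract in itertools.permutations(contracts, N_components)]
--     blends = [contract for contract in blends if len(contract) == len(set(contract)) ]
--     # Get all possible proportion combinations
--     blends_proportions = [comb for comb in itertools.combinations_with_replacement(udfaldsrum[N_components], N_components)]
--     blends_proportions = [comb for comb in blends_proportions  if sum(comb) == 100]
--
--     # Combine proportions and contracts
--     blends_final = list(itertools.product(blends, blends_proportions))
--     # Clear variables from memory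
--     del blends,blends_proportions
--
--     return blends_final
-- ===== SOURCE B (Python) =====
-- def blend_prop_permutations(contracts: list, N_components: int) -> list:
--     # Pool of percentages available for an N-component blend (keys = number of
--     # components, as in the original table).
--     udfaldsrum = {
--         1: [100],
--         2: list(range(5, 96, 5)),
--         3: list(range(5, 91, 5)),
--         4: list(range(5, 86, 5)),
--         5: list(range(5, 81, 5)),
--         6: list(range(5, 76, 5)),
--         7: list(range(5, 71, 5)),
--     }
--     proportions_pool = udfaldsrum[N_components]
--
--     # Ordered permutations of distinct contracts, pruning repeats while building
--     # instead of filtering complete tuples afterwards.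
--     blends = []
--
--     def pick(remaining, chosen):
--         if len(chosen) == N_components:
--             blends.append(tuple(chosen))
--             return
--         for i in range(len(remaining)):
--             v = remaining[i]
--             if v in chosen:
--                 continue
--             pick(remaining[:i] + remaining[i + 1:], chosen + (v,))
--
--     pick(list(contracts), ())
--
--     # Non-decreasing proportion tuples summing to exactly 100, enumerated
--     # recursively with a running total; branches that already exceed 100 are cut.
--     blends_proportions = []
--
--     def grow(pool, partial, total):
--         if len(partial) == N_components:
--             if total == 100:
--                 blends_proportions.append(partial)
--             return
--         if not pool:
--             return
--         v = pool[0]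
--         if total + v <= 100:
--             grow(pool, partial + (v,), total + v)
--         grow(pool[1:], partial, total)
--
--     grow(proportions_pool, (), 0)
--
--     return [(b, p) for b in blends for p in blends_proportions]
-- ===== Notes on version B (the rewrite author's own statement) =====
-- stated objective: alternative
-- what changed: Replaces the itertools pipeline (permutations + distinctness filter, combinations_with_replacement + sum filter, product) with two recursive backtracking enumerators that prune repeated contracts while building each permutation and cut proportion branches whose running total already exceeds 100, plus a plain product comprehension; the percentage table is kept.
import Mathlib
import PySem

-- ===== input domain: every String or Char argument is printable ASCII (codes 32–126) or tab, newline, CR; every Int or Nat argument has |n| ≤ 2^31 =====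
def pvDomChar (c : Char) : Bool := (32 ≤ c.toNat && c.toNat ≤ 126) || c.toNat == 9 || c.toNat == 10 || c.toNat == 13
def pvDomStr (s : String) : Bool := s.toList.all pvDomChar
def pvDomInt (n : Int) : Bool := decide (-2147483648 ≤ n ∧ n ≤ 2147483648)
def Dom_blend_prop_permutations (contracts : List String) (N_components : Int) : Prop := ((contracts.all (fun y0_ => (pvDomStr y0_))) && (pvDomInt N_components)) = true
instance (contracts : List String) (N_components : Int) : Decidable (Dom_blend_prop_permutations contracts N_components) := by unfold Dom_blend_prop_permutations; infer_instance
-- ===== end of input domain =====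

-- B replaces the itertools pipelines (permutations + distinctness filter; combinations_with_replacement
-- + sum filter) by two recursive backtracking enumerators that prune repeated contracts and over-100
-- running totals while building; same return value on Pre_ (N_components in 1..7), proved below.


-- ===== PORT A =====

-- the literal dict 'udfaldsrum' of A (keys = number of components)
def pvUdfaldsrum : PySem.Dict Int (List Int) :=
  PySem.Dict.ofList
    [ (1, [100])
    , (2, PySem.List.pyRange 5 96 5)
    , (3, PySem.List.pyRange 5 91 5)
    , (4, PySem.List.pyRange 5 86 5)
    , (5, PySem.List.pyRange 5 81 5)
    , (6, PySem.List.pyRange 5 76 5)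
    , (7, PySem.List.pyRange 5 71 5) ]

-- hand port of itertools.combinations_with_replacement(xs, k): exact, including CPython's
-- lexicographic emission order (tuples using the head first, then tuples from the tail)
def pvCWR (xs : List Int) (k : Nat) : List (List Int) :=
  match k, xs with
  | 0, _ => [[]]
  | _+1, [] => []
  | k+1, x :: rest => (pvCWR (x :: rest) k).map (x :: ·) ++ pvCWR rest (k+1)
termination_by (k, xs)

def blend_prop_permutations (contracts : List String) (N_components : Int) : List (List String × List Int) :=
  let udfaldsrum := pvUdfaldsrum
  let blends := PySem.List.permutations contracts N_components.toNat
  let blends := blends.filter (fun contract => (contract.length : Int) == PySem.Set.len (PySem.Set.ofList contract))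
  -- udfaldsrum[N_components]: KeyError (= none) is excluded by Pre_; '[]' below is a placeholder default
  let blends_proportions := pvCWR ((udfaldsrum.get? N_components).getD []) N_components.toNat
  let blends_proportions := blends_proportions.filter (fun comb => comb.sum == 100)
  blends.flatMap (fun b => blends_proportions.map (fun p => (b, p)))

-- ===== PORT B =====

-- Source B's 'pick': choose each still-unused position in index order, skipping values already chosen
def pvPick (remaining : List String) (k : Nat) (chosen : List String) : List (List String) :=
  match k with
  | 0 => [chosen]
  | k+1 =>
      (List.range remaining.length).flatMap (fun i =>
        match remaining[i]? with
        | none => []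
        | some v =>
            if v ∈ chosen then []
            else pvPick (remaining.eraseIdx i) k (chosen ++ [v]))

-- Source B's 'grow': extend with the pool's head (if the running total stays ≤ 100) or drop the head
def pvGrow (pool : List Int) (k : Nat) (acc : List Int) (total : Int) : List (List Int) :=
  match k, pool with
  | 0, _ => if total == 100 then [acc] else []
  | _+1, [] => []
  | k+1, v :: rest =>
      (if total + v ≤ 100 then pvGrow (v :: rest) k (acc ++ [v]) (total + v) else []) ++
      pvGrow rest (k+1) acc total
termination_by (k, pool)

def blend_prop_permutations_alt (contracts : List String) (N_components : Int) : List (List String × List Int) :=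
  -- Source B builds the same literal dict 'udfaldsrum' as A; udfaldsrum[N_components] (KeyError = none
  -- excluded by Pre_, '[]' a placeholder default)
  let proportions_pool : List Int := (pvUdfaldsrum.get? N_components).getD []
  let blends := pvPick contracts N_components.toNat []
  let blends_proportions := pvGrow proportions_pool N_components.toNat [] 0
  blends.flatMap (fun b => blends_proportions.map (fun p => (b, p)))

-- ===== PRECONDITION & SPEC =====
-- A raises on every N_components outside 1..7 (KeyError on udfaldsrum, ValueError for negative N);
-- Pre_ admits exactly the inputs on which A returns.
def Pre_blend_prop_permutations (contracts : List String) (N_components : Int) : Prop :=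
  1 ≤ N_components ∧ N_components ≤ 7
instance (contracts : List String) (N_components : Int) : Decidable (Pre_blend_prop_permutations contracts N_components) := by unfold Pre_blend_prop_permutations; infer_instance

def pvWitness_blend_prop_permutations : List String × Int := (["a", "b"], 2)

def Spec_blend_prop_permutations (contracts : List String) (N_components : Int) (out : List (List String × List Int)) : Prop := out = blend_prop_permutations_alt contracts N_components
instance (contracts : List String) (N_components : Int) (out : List (List String × List Int)) : Decidable (Spec_blend_prop_permutations contracts N_components out) := by unfold Spec_blend_prop_permutations; infer_instance

-- ===== CLAIM (what is proved, stated in full; the proofs are below) =====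
def Claim_equal_blend_prop_permutations : Prop := ∀ (contracts : List String) (N_components : Int), Dom_blend_prop_permutations contracts N_components → Pre_blend_prop_permutations contracts N_components → Spec_blend_prop_permutations contracts N_components (blend_prop_permutations contracts N_components)


-- ===== LEMMAS AND PROOFS =====

theorem pv_foldl_add_length_le (xs : List String) : ∀ (s : List String),
    (xs.foldl PySem.Set.add s).length ≤ s.length + xs.length := by
  induction xs with
  | nil => intro s; simp
  | cons x xs ih =>
      intro s
      simp only [List.foldl_cons]
      calc ((xs.foldl PySem.Set.add (PySem.Set.add s x)).length)
          ≤ (PySem.Set.add s x).length + xs.length := ih _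
        _ ≤ s.length + (x :: xs).length := by
            simp only [PySem.Set.add]; split <;> simp <;> omega

theorem pv_foldl_add_length_eq_iff (xs : List String) : ∀ (s : List String),
    ((xs.foldl PySem.Set.add s).length = s.length + xs.length) ↔
      (xs.Nodup ∧ ∀ x ∈ xs, x ∉ s) := by
  induction xs with
  | nil => intro s; simp
  | cons x xs ih =>
      intro s
      simp only [List.foldl_cons]
      by_cases hx : x ∈ s
      · have hadd : PySem.Set.add s x = s := by
          simp [PySem.Set.add, List.contains_eq_mem, hx]
        rw [hadd]
        have hle := pv_foldl_add_length_le xs s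
        simp only [List.length_cons]
        constructor
        · intro h; omega
        · rintro ⟨-, hall⟩; exact absurd hx (hall x (by simp))
      · have hadd : PySem.Set.add s x = s ++ [x] := by
          simp [PySem.Set.add, List.contains_eq_mem, hx]
        have hlen : s.length + (x :: xs).length = (s ++ [x]).length + xs.length := by
          simp [List.length_append]; omega
        rw [hadd, hlen, ih]
        constructor
        · rintro ⟨hnd, hall⟩
          refine ⟨List.nodup_cons.mpr ⟨fun hm => ?_, hnd⟩,
            List.forall_mem_cons.mpr ⟨hx, fun y hy hys =>
              hall y hy (List.mem_append.mpr (Or.inl hys))⟩⟩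
          exact hall x hm (List.mem_append.mpr (Or.inr (List.mem_singleton.mpr rfl)))
        · rintro ⟨hnd', hall'⟩
          obtain ⟨h1, hnd⟩ := List.nodup_cons.mp hnd'
          obtain ⟨-, hall⟩ := List.forall_mem_cons.mp hall'
          refine ⟨hnd, fun y hy hmem => ?_⟩
          rcases List.mem_append.mp hmem with hmm | hmm
          · exact hall y hy hmm
          · exact h1 ((List.mem_singleton.mp hmm) ▸ hy)

theorem pv_nodup_pred (t : List String) :
    ((t.length : Int) == PySem.Set.len (PySem.Set.ofList t)) = decide t.Nodup := by
  have h := pv_foldl_add_length_eq_iff t []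
  simp only [List.length_nil, List.not_mem_nil, not_false_iff, imp_true_iff, and_true,
    Nat.zero_add] at h
  rw [Bool.eq_iff_iff]
  simp only [beq_iff_eq, decide_eq_true_eq, PySem.Set.len, PySem.Set.ofList, PySem.Set.empty,
    Int.natCast_inj]
  constructor
  · intro hlen; exact h.mp hlen.symm
  · intro hnd; exact (h.mpr hnd).symm

theorem pv_pick_eq (k : Nat) : ∀ (xs pre : List String),
    pvPick xs k pre =
      ((PySem.List.permutations xs k).filter
        (fun t => decide (t.Nodup ∧ ∀ v ∈ t, v ∉ pre))).map (pre ++ ·) := by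
  induction k with
  | zero =>
      intro xs pre
      simp [pvPick, PySem.List.permutations]
  | succ k ih =>
      intro xs pre
      simp only [pvPick, PySem.List.permutations]
      rw [List.filter_flatMap, List.map_flatMap]
      refine congrFun (congrArg List.flatMap (funext fun i => ?_)) _
      cases h : xs[i]? with
      | none => simp [h]
      | some v =>
          simp only [h]
          rw [List.filter_map]
          by_cases hv : v ∈ pre
          · have hfil : (List.filter ((fun t => decide (t.Nodup ∧ ∀ u ∈ t, u ∉ pre)) ∘ (fun p => v :: p))
                (PySem.List.permutations (xs.eraseIdx i) k)) = [] := by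
              apply List.filter_eq_nil_iff.mpr
              intro t _
              simp only [Function.comp_apply, decide_eq_true_eq]
              rintro ⟨-, hall⟩
              exact hall v (by simp) hv
            rw [hfil]
            simp [hv]
          · rw [if_neg hv, ih]
            have hpred : (fun t : List String => decide (t.Nodup ∧ ∀ u ∈ t, u ∉ pre ++ [v])) =
                ((fun t : List String => decide (t.Nodup ∧ ∀ u ∈ t, u ∉ pre)) ∘ (fun p => v :: p)) := by
              funext t
              simp only [Function.comp_apply]
              rw [decide_eq_decide]
              constructor
              · rintro ⟨hnd, hall⟩
                have hvt : v ∉ t := fun hm => hall v hm (by simp)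
                exact ⟨List.nodup_cons.mpr ⟨hvt, hnd⟩,
                  List.forall_mem_cons.mpr ⟨hv, fun u hu hup => hall u hu (by simp [hup])⟩⟩
              · rintro ⟨hnd', hall'⟩
                obtain ⟨hvt, hnd⟩ := List.nodup_cons.mp hnd'
                obtain ⟨-, hall⟩ := List.forall_mem_cons.mp hall'
                refine ⟨hnd, fun u hu hum => ?_⟩
                rcases List.mem_append.mp hum with hm | hm
                · exact hall u hu hm
                · exact hvt ((List.mem_singleton.mp hm) ▸ hu)
            rw [hpred, List.map_map]
            refine congrFun (congrArg List.map (funext fun t => ?_)) _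
            simp [List.append_assoc]

theorem pv_mem_cwr (xs : List Int) (k : Nat) :
    ∀ t ∈ pvCWR xs k, ∀ u ∈ t, u ∈ xs := by
  induction xs, k using pvCWR.induct with
  | case1 xs => intro t ht u hu; simp [pvCWR] at ht; subst ht; simp at hu
  | case2 k => intro t ht; simp [pvCWR] at ht
  | case3 k x rest ih1 ih2 =>
      intro t ht u hu
      rw [pvCWR] at ht
      rcases List.mem_append.mp ht with hm | hm
      · obtain ⟨t', ht', rfl⟩ := List.mem_map.mp hm
        rcases List.mem_cons.mp hu with rfl | hu'
        · simp
        · exact ih1 t' ht' u hu'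
      · exact List.mem_cons_of_mem _ (ih2 t hm u hu)

theorem pv_grow_eq (pool : List Int) (k : Nat) (acc : List Int) (total : Int) :
    (∀ v ∈ pool, 0 ≤ v) →
    pvGrow pool k acc total =
      ((pvCWR pool k).filter (fun t => (total + t.sum) == 100)).map (acc ++ ·) := by
  induction pool, k, acc, total using pvGrow.induct with
  | case1 pool acc total h =>
      intro _
      simp [pvGrow, pvCWR, h]
  | case2 pool acc total h =>
      intro _
      simp [pvGrow, pvCWR, h]
  | case3 acc total n => intro _; simp [pvGrow, pvCWR]
  | case4 acc total k v rest ih1 ih2 =>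
      intro hpos
      have hv0 : 0 ≤ v := hpos v (by simp)
      have hrest : ∀ u ∈ rest, 0 ≤ u := fun u hu => hpos u (by simp [hu])
      simp only [pvGrow, pvCWR]
      rw [List.filter_append, List.map_append, List.filter_map]
      have hpred : ((fun t : List Int => (total + t.sum) == 100) ∘ (fun p => v :: p)) =
          (fun t : List Int => ((total + v) + t.sum) == 100) := by
        funext t
        simp only [Function.comp_apply, List.sum_cons]
        rw [show total + (v + t.sum) = total + v + t.sum by ring]
      rw [hpred]
      congr 1
      · by_cases hle : total + v ≤ 100
        · rw [if_pos hle, ih1 hpos, List.map_map]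
          refine congrFun (congrArg List.map (funext fun t => ?_)) _
          simp [List.append_assoc]
        · rw [if_neg hle]
          have : (pvCWR (v :: rest) k).filter (fun t : List Int => ((total + v) + t.sum) == 100) = [] := by
            apply List.filter_eq_nil_iff.mpr
            intro t ht
            have hsum : 0 ≤ t.sum :=
              List.sum_nonneg (fun u hu => hpos u (pv_mem_cwr (v :: rest) k t ht u hu))
            simp only [beq_iff_eq]
            omega
          rw [this]
          simp
      · exact ih2 hrest

theorem pv_main (contracts : List String) (N : Int) (L : List Int)
    (hA : (pvUdfaldsrum.get? N).getD [] = L)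
    (hpos : ∀ v ∈ L, 0 ≤ v) :
    blend_prop_permutations contracts N = blend_prop_permutations_alt contracts N := by
  have hblends : (PySem.List.permutations contracts N.toNat).filter
      (fun contract => (contract.length : Int) == PySem.Set.len (PySem.Set.ofList contract)) =
      pvPick contracts N.toNat [] := by
    rw [pv_pick_eq]
    have hp : (fun t : List String => decide (t.Nodup ∧ ∀ v ∈ t, v ∉ ([] : List String))) =
        (fun t : List String => (t.length : Int) == PySem.Set.len (PySem.Set.ofList t)) := by
      funext t
      rw [pv_nodup_pred, decide_eq_decide]
      simp
    rw [hp]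
    simp
  have hprops : (pvCWR L N.toNat).filter (fun comb => comb.sum == 100) =
      pvGrow L N.toNat [] 0 := by
    rw [pv_grow_eq L N.toNat [] 0 hpos]
    have hq : (fun t : List Int => ((0 : Int) + t.sum) == 100) = (fun t : List Int => t.sum == 100) := by
      funext t
      rw [zero_add]
    rw [hq]
    simp
  simp only [blend_prop_permutations, blend_prop_permutations_alt, hA]
  rw [hblends, hprops]

-- ===== VERDICT (by name: the statement is the Claim_ definition above) =====
theorem blend_prop_permutations_spec : Claim_equal_blend_prop_permutations := by
  intro contracts N hdom hpre
  unfold Spec_blend_prop_permutations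
  obtain ⟨h1, h2⟩ := hpre
  interval_cases N <;> exact pv_main contracts _ _ rfl (by decide)
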